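-- pv_equiv track=rewrite | github.com/adharvpn/doomsday | app.py | triage_logic
-- ===== SOURCE A (Python) =====
-- def triage_logic(symptoms):
--     """Advanced Triage Logic."""
--     if not symptoms: return "General Physician", "Low", "No symptoms selected."
--
--     critical_sx = ["Chest Pain", "Breathlessness", "Uncontrolled Bleeding", "Seizures", "Severe Head Trauma", "Sudden Vision Loss"]
--     if any(x in symptoms for x in critical_sx):
--         if "Chest Pain" in symptoms or "Breathlessness" in symptoms:
--             return "Cardiologist", "High", "Suspected Cardiac Event. IMMEDIATE attention required."
--         if "Seizures" in symptoms or "Severe Head Trauma" in symptoms: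
--             return "Neurologist", "High", "Critical Neurological Event. IMMEDIATE attention required."
--         return "Emergency Unit", "High", "Critical Condition. Proceed to ER immediately."
--
--     urgent_sx = ["High Fever (>103)", "Fracture", "Deep Cut", "Severe Headache", "Eye Pain", "Blurred Vision", "Ear Pain"]
--     if any(x in symptoms for x in urgent_sx):
--         if "Fracture" in symptoms: return "Orthopedic", "Med", "Possible fracture. X-Ray required."
--         if "Eye Pain" in symptoms or "Blurred Vision" in symptoms: return "Ophthalmologist", "Med", "Eye injury requires urgent check."
--         if "Severe Headache" in symptoms: return "Neurologist", "Med", "Migraine or Neuro issue."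
--         return "General Physician", "Med", "Urgent consultation recommended."
--
--     mapping = {
--         "Skin Rash": "Dermatologist", "Itching": "Dermatologist", "Acne": "Dermatologist",
--         "Bone Pain": "Orthopedic", "Back Pain": "Orthopedic",
--         "Dizziness": "Neurologist", "Sore Throat": "ENT Specialist",
--         "Toothache": "Dentist", "Gum Bleeding": "Dentist",
--         "Pregnancy Checkup": "Gynecologist", "Period Pain": "Gynecologist",
--         "Anxiety": "Psychiatrist", "Depression": "Psychiatrist", "Insomnia": "Psychiatrist",
--         "Child Fever": "Pediatrician", "Child Cough": "Pediatrician",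
--         "Mild Fever": "General Physician", "Cough": "General Physician"
--     }
--
--     found_spec = "General Physician"
--     for s, doc in mapping.items():
--         if s in symptoms:
--             found_spec = doc
--             break
--
--     return found_spec, "Low", "Condition appears stable. Consider Home Care or booking a later slot."
-- ===== SOURCE B (Python) =====
-- # Data-driven re-implementation: one ordered rule table scanned once (first rule
-- # whose triggers intersect the symptoms wins) replaces A's nested if/elif chains.
--
-- _RULES = [
--     (["Chest Pain", "Breathlessness"],
--      ("Cardiologist", "High", "Suspected Cardiac Event. IMMEDIATE attention required.")),
--     (["Seizures", "Severe Head Trauma"],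
--      ("Neurologist", "High", "Critical Neurological Event. IMMEDIATE attention required.")),
--     (["Uncontrolled Bleeding", "Sudden Vision Loss"],
--      ("Emergency Unit", "High", "Critical Condition. Proceed to ER immediately.")),
--     (["Fracture"],
--      ("Orthopedic", "Med", "Possible fracture. X-Ray required.")),
--     (["Eye Pain", "Blurred Vision"],
--      ("Ophthalmologist", "Med", "Eye injury requires urgent check.")),
--     (["Severe Headache"],
--      ("Neurologist", "Med", "Migraine or Neuro issue.")),
--     (["High Fever (>103)", "Deep Cut", "Ear Pain"],
--      ("General Physician", "Med", "Urgent consultation recommended.")),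
-- ]
-- _STABLE_MSG = "Condition appears stable. Consider Home Care or booking a later slot."
-- _RULES += [
--     ([s], (doc, "Low", _STABLE_MSG))
--     for s, doc in [
--         ("Skin Rash", "Dermatologist"), ("Itching", "Dermatologist"), ("Acne", "Dermatologist"),
--         ("Bone Pain", "Orthopedic"), ("Back Pain", "Orthopedic"),
--         ("Dizziness", "Neurologist"), ("Sore Throat", "ENT Specialist"),
--         ("Toothache", "Dentist"), ("Gum Bleeding", "Dentist"),
--         ("Pregnancy Checkup", "Gynecologist"), ("Period Pain", "Gynecologist"),
--         ("Anxiety", "Psychiatrist"), ("Depression", "Psychiatrist"), ("Insomnia", "Psychiatrist"),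
--         ("Child Fever", "Pediatrician"), ("Child Cough", "Pediatrician"),
--         ("Mild Fever", "General Physician"), ("Cough", "General Physician"),
--     ]
-- ]
--
-- def triage_logic(symptoms):
--     if not symptoms:
--         return "General Physician", "Low", "No symptoms selected."
--     present = set(symptoms)
--     for triggers, result in _RULES:
--         if any(t in present for t in triggers):
--             return result
--     return "General Physician", "Low", _STABLE_MSG
-- ===== Notes on version B (the rewrite author's own statement) =====
-- stated objective: simpler
-- what changed: Replaces A's nested if/elif control flow and hand-rolled dict loop with one ordered rule table (triggers -> result) scanned once, first matching rule wins, with symptom membership tested against a set built once.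
import Mathlib
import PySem

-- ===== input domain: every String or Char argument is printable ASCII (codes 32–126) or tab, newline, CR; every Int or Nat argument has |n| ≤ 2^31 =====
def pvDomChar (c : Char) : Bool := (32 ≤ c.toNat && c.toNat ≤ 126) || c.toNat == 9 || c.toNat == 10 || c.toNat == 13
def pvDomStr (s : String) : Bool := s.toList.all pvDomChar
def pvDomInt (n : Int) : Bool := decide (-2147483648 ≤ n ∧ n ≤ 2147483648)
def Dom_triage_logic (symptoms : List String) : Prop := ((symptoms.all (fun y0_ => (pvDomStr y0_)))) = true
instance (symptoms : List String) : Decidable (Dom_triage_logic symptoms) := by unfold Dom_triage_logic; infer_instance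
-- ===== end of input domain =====

-- B replaces A's nested if/elif chains by a single scan over an ordered rule table
-- (objective: simpler/data-driven decomposition; same cost).

-- ===== PORT A =====
-- the mapping-dict loop of A: first key present in symptoms wins, else the default
def triageFindSpec : List (String × String) → List String → String
  | [], _ => "General Physician"
  | (s, doc) :: rest, symptoms =>
    if symptoms.contains s then doc else triageFindSpec rest symptoms

def triage_logic (symptoms : List String) : String × String × String :=
  if symptoms = [] then ("General Physician", "Low", "No symptoms selected.")
  else
    let critical_sx := ["Chest Pain", "Breathlessness", "Uncontrolled Bleeding", "Seizures", "Severe Head Trauma", "Sudden Vision Loss"]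
    if critical_sx.any (fun x => symptoms.contains x) then
      if symptoms.contains "Chest Pain" || symptoms.contains "Breathlessness" then
        ("Cardiologist", "High", "Suspected Cardiac Event. IMMEDIATE attention required.")
      else if symptoms.contains "Seizures" || symptoms.contains "Severe Head Trauma" then
        ("Neurologist", "High", "Critical Neurological Event. IMMEDIATE attention required.")
      else
        ("Emergency Unit", "High", "Critical Condition. Proceed to ER immediately.")
    else
      let urgent_sx := ["High Fever (>103)", "Fracture", "Deep Cut", "Severe Headache", "Eye Pain", "Blurred Vision", "Ear Pain"]
      if urgent_sx.any (fun x => symptoms.contains x) then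
        if symptoms.contains "Fracture" then ("Orthopedic", "Med", "Possible fracture. X-Ray required.")
        else if symptoms.contains "Eye Pain" || symptoms.contains "Blurred Vision" then
          ("Ophthalmologist", "Med", "Eye injury requires urgent check.")
        else if symptoms.contains "Severe Headache" then ("Neurologist", "Med", "Migraine or Neuro issue.")
        else ("General Physician", "Med", "Urgent consultation recommended.")
      else
        let mapping : List (String × String) :=
          [("Skin Rash", "Dermatologist"), ("Itching", "Dermatologist"), ("Acne", "Dermatologist"),
           ("Bone Pain", "Orthopedic"), ("Back Pain", "Orthopedic"),
           ("Dizziness", "Neurologist"), ("Sore Throat", "ENT Specialist"),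
           ("Toothache", "Dentist"), ("Gum Bleeding", "Dentist"),
           ("Pregnancy Checkup", "Gynecologist"), ("Period Pain", "Gynecologist"),
           ("Anxiety", "Psychiatrist"), ("Depression", "Psychiatrist"), ("Insomnia", "Psychiatrist"),
           ("Child Fever", "Pediatrician"), ("Child Cough", "Pediatrician"),
           ("Mild Fever", "General Physician"), ("Cough", "General Physician")]
        (triageFindSpec mapping symptoms, "Low", "Condition appears stable. Consider Home Care or booking a later slot.")

-- ===== PORT B =====
def triageStableMsg : String := "Condition appears stable. Consider Home Care or booking a later slot."

def triageRules : List (List String × (String × String × String)) :=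
  [(["Chest Pain", "Breathlessness"],
    ("Cardiologist", "High", "Suspected Cardiac Event. IMMEDIATE attention required.")),
   (["Seizures", "Severe Head Trauma"],
    ("Neurologist", "High", "Critical Neurological Event. IMMEDIATE attention required.")),
   (["Uncontrolled Bleeding", "Sudden Vision Loss"],
    ("Emergency Unit", "High", "Critical Condition. Proceed to ER immediately.")),
   (["Fracture"], ("Orthopedic", "Med", "Possible fracture. X-Ray required.")),
   (["Eye Pain", "Blurred Vision"], ("Ophthalmologist", "Med", "Eye injury requires urgent check.")),
   (["Severe Headache"], ("Neurologist", "Med", "Migraine or Neuro issue.")),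
   (["High Fever (>103)", "Deep Cut", "Ear Pain"],
    ("General Physician", "Med", "Urgent consultation recommended."))] ++
  ([("Skin Rash", "Dermatologist"), ("Itching", "Dermatologist"), ("Acne", "Dermatologist"),
    ("Bone Pain", "Orthopedic"), ("Back Pain", "Orthopedic"),
    ("Dizziness", "Neurologist"), ("Sore Throat", "ENT Specialist"),
    ("Toothache", "Dentist"), ("Gum Bleeding", "Dentist"),
    ("Pregnancy Checkup", "Gynecologist"), ("Period Pain", "Gynecologist"),
    ("Anxiety", "Psychiatrist"), ("Depression", "Psychiatrist"), ("Insomnia", "Psychiatrist"),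
    ("Child Fever", "Pediatrician"), ("Child Cough", "Pediatrician"),
    ("Mild Fever", "General Physician"), ("Cough", "General Physician")].map
      (fun p => ([p.1], (p.2, "Low", triageStableMsg))))

-- scan the rule table: first rule with a trigger present in `present` wins
def triageScan (present : PySem.Set String) : List (List String × (String × String × String)) → String × String × String
  | [] => ("General Physician", "Low", triageStableMsg)
  | (triggers, result) :: rest =>
    if triggers.any (fun t => present.contains t) then result else triageScan present rest

def triage_logic_alt (symptoms : List String) : String × String × String :=
  if symptoms = [] then ("General Physician", "Low", "No symptoms selected.")
  else triageScan (PySem.Set.ofList symptoms) triageRules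

-- ===== PRECONDITION & SPEC =====
def Spec_triage_logic (symptoms : List String) (out : String × String × String) : Prop := out = triage_logic_alt symptoms
instance (symptoms : List String) (out : String × String × String) : Decidable (Spec_triage_logic symptoms out) := by unfold Spec_triage_logic; infer_instance

-- ===== CLAIM (what is proved, stated in full; the proofs are below) =====
def Claim_equal_triage_logic : Prop := ∀ (symptoms : List String), Dom_triage_logic symptoms → Spec_triage_logic symptoms (triage_logic symptoms)

-- ===== LEMMAS AND PROOFS =====
theorem set_contains_iff (s : String) (xs : List String) :
    (PySem.Set.ofList xs).contains s = xs.contains s := by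
  rw [Bool.eq_iff_iff]
  simp [PySem.Set.contains, PySem.Set.mem_ofList]

-- scanning the Low-priority singleton rules equals A's mapping loop
theorem scan_map_eq (symptoms : List String) (m : List (String × String)) :
    triageScan (PySem.Set.ofList symptoms) (m.map (fun p => ([p.1], (p.2, "Low", triageStableMsg))))
      = (triageFindSpec m symptoms, "Low", triageStableMsg) := by
  induction m with
  | nil => rfl
  | cons p rest ih =>
    simp only [List.map_cons, triageScan, triageFindSpec, List.any_cons, List.any_nil,
      Bool.or_false, set_contains_iff]
    by_cases h : p.1 ∈ symptoms
    · simp [h]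
    · simp [h, ih]

set_option maxHeartbeats 1000000 in
theorem triage_eq (symptoms : List String) :
    triage_logic symptoms = triage_logic_alt symptoms := by
  unfold triage_logic triage_logic_alt
  by_cases hnil : symptoms = []
  · simp [hnil]
  simp only [if_neg hnil]
  by_cases h0 : "Chest Pain" ∈ symptoms
  · simp [triageScan, triageRules, triageStableMsg, h0]
  by_cases h1 : "Breathlessness" ∈ symptoms
  · simp [triageScan, triageRules, triageStableMsg, h1, h0]
  by_cases h2 : "Seizures" ∈ symptoms
  · simp [triageScan, triageRules, triageStableMsg, h2, h0, h1]
  by_cases h3 : "Severe Head Trauma" ∈ symptoms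
  · simp [triageScan, triageRules, triageStableMsg, h3, h0, h1, h2]
  by_cases h4 : "Uncontrolled Bleeding" ∈ symptoms
  · simp [triageScan, triageRules, triageStableMsg, h4, h0, h1, h2, h3]
  by_cases h5 : "Sudden Vision Loss" ∈ symptoms
  · simp [triageScan, triageRules, triageStableMsg, h5, h0, h1, h2, h3, h4]
  by_cases h6 : "Fracture" ∈ symptoms
  · simp [triageScan, triageRules, triageStableMsg, h6, h0, h1, h2, h3, h4, h5]
  by_cases h7 : "Eye Pain" ∈ symptoms
  · simp [triageScan, triageRules, triageStableMsg, h7, h0, h1, h2, h3, h4, h5, h6]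
  by_cases h8 : "Blurred Vision" ∈ symptoms
  · simp [triageScan, triageRules, triageStableMsg, h8, h0, h1, h2, h3, h4, h5, h6, h7]
  by_cases h9 : "Severe Headache" ∈ symptoms
  · simp [triageScan, triageRules, triageStableMsg, h9, h0, h1, h2, h3, h4, h5, h6, h7, h8]
  by_cases h10 : "High Fever (>103)" ∈ symptoms
  · simp [triageScan, triageRules, triageStableMsg, h10, h0, h1, h2, h3, h4, h5, h6, h7, h8, h9]
  by_cases h11 : "Deep Cut" ∈ symptoms
  · simp [triageScan, triageRules, triageStableMsg, h11, h0, h1, h2, h3, h4, h5, h6, h7, h8, h9, h10]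
  by_cases h12 : "Ear Pain" ∈ symptoms
  · simp [triageScan, triageRules, triageStableMsg, h12, h0, h1, h2, h3, h4, h5, h6, h7, h8, h9, h10, h11]
  simp only [triageRules, triageScan, List.any_cons, List.any_nil, List.cons_append,
    List.nil_append, set_contains_iff, List.contains_eq_mem, decide_eq_true_eq]
  rw [scan_map_eq]
  simp [triageFindSpec, triageStableMsg, h0, h1, h2, h3, h4, h5, h6, h7, h8, h9, h10, h11, h12]

-- ===== VERDICT (by name: the statement is the Claim_ definition above) =====
theorem triage_logic_spec : Claim_equal_triage_logic := by
  intro symptoms _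
  unfold Spec_triage_logic
  exact triage_eq symptoms
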